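-- pv_equiv track=rewrite | github.com/wackou/periscope | periscope/periscope.py | arrangeSubtitles
-- ===== SOURCE A (Python) =====
-- from itertools import groupby
--
-- def arrangeSubtitles(subtitles):
--     ''' Arrange subtitles in a handy dict by filename, language and plugin '''
--     arrangedSubtitles = {}
--     for (filename, subsByFilename) in groupby(sorted(subtitles, key=lambda x: x["filename"]), lambda x: x["filename"]):
--         arrangedSubtitles[filename] = {}
--         for (language, subsByFilenameByLanguage) in groupby(sorted(subsByFilename, key=lambda x: x["lang"]), lambda x: x["lang"]):
--             arrangedSubtitles[filename][language] = {}
--             for (plugin, subsByFilenameByLanguageByPlugin) in groupby(sorted(subsByFilenameByLanguage, key=lambda x: x["plugin"]), lambda x: x["plugin"]):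
--                 arrangedSubtitles[filename][language][plugin] = sorted(list(subsByFilenameByLanguageByPlugin))
--     return arrangedSubtitles
-- ===== SOURCE B (Python) =====
-- def arrangeSubtitles(subtitles):
--     ''' Arrange subtitles in a handy dict by filename, language and plugin '''
--     nested = {}
--     for x in subtitles:
--         nested.setdefault(x["filename"], {}).setdefault(x["lang"], {}).setdefault(x["plugin"], []).append(x)
--     return {f: {l: {p: sorted(nested[f][l][p]) for p in sorted(nested[f][l])}
--                 for l in sorted(nested[f])}
--             for f in sorted(nested)}
-- ===== Notes on version B (the rewrite author's own statement) =====
-- stated objective: alternative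
-- what changed: B replaces A's three nested sorted+groupby passes by one hashing pass that fills the nested dict with setdefault/append, followed by a single walk that orders each level's keys with sorted() (the leaf sort kept, as in A).
import Mathlib
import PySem

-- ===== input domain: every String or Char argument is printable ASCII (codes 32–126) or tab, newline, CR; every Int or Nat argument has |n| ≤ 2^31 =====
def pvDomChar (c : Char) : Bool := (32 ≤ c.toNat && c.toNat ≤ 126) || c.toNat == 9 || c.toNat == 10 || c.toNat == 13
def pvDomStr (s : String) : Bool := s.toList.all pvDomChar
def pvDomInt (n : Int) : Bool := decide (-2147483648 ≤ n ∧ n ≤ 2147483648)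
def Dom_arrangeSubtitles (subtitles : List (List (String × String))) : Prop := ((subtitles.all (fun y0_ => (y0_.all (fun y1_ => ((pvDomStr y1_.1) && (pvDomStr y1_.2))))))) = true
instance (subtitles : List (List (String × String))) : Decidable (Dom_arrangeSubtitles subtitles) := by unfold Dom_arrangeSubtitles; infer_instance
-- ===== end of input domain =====

-- B rebuilds the nested dict in one hashing pass plus a key-sorting walk instead of A's
-- three levels of sorted+groupby; equivalence is about the return value (neither mutates its input).

-- shared helper: x["key"] on a Python dict given as an association list (first match);
-- `none` is Python's KeyError, excluded by Pre_, so the total form uses a "" default.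
def getVal (k : String) (x : List (String × String)) : String :=
  ((PySem.Dict.mk x).get? k).getD ""

-- ===== PORT A =====
-- itertools.groupby(l, k): consecutive runs of equal keys, each materialized before the
-- next is requested (exactly how A consumes them).
def groupby (k : List (String × String) → String) :
    List (List (String × String)) → List (String × List (List (String × String)))
  | [] => []
  | x :: xs =>
    match groupby k xs with
    | [] => [(k x, [x])]
    | (v, g) :: rest => if k x == v then (v, x :: g) :: rest else (k x, [x]) :: (v, g) :: rest

-- innermost loop: arrangedSubtitles[filename][language][plugin] = sorted(list(group)).
-- Python's sorted raises TypeError on ≥ 2 dicts (excluded by Pre_) and is the identity on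
-- ≤ 1 elements, so the leaf is the group itself here.
def aLevel3 (g2 : List (List (String × String))) :
    List (String × List (List (String × String))) :=
  ((groupby (getVal "plugin") (PySem.List.sorted g2 (getVal "plugin"))).foldl
    (fun d3 pg => d3.insert pg.1 pg.2) PySem.Dict.empty).items

def aLevel2 (g : List (List (String × String))) :
    List (String × List (String × List (List (String × String)))) :=
  ((groupby (getVal "lang") (PySem.List.sorted g (getVal "lang"))).foldl
    (fun d2 lg => d2.insert lg.1 (aLevel3 lg.2)) PySem.Dict.empty).items

def arrangeSubtitles (subtitles : List (List (String × String))) : List (String × List (String × List (String × List (List (String × String))))) :=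
  ((groupby (getVal "filename") (PySem.List.sorted subtitles (getVal "filename"))).foldl
    (fun d fg => d.insert fg.1 (aLevel2 fg.2)) PySem.Dict.empty).items

-- ===== PORT B =====
-- inner comprehensions of Source B; the leaf sorted(...) raises TypeError on ≥ 2 dicts
-- (excluded by Pre_) and is the identity on ≤ 1 elements, so the leaf is the stored list.
def bLevel3 (byPlug : PySem.Dict String (List (List (String × String)))) :
    List (String × List (List (String × String))) :=
  (PySem.List.sorted byPlug.keys (fun v => v)).map (fun p => (p, byPlug.getD p []))

def bLevel2 (byLang : PySem.Dict String (PySem.Dict String (List (List (String × String))))) :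
    List (String × List (String × List (List (String × String)))) :=
  (PySem.List.sorted byLang.keys (fun v => v)).map
    (fun l => (l, bLevel3 (byLang.getD l PySem.Dict.empty)))

def arrangeSubtitles_alt (subtitles : List (List (String × String))) : List (String × List (String × List (String × List (List (String × String))))) :=
  -- one pass: nested.setdefault(f, {}).setdefault(l, {}).setdefault(p, []).append(x)
  -- (setdefault-then-mutate at key k is exactly Dict.modify k default mutation)
  let nested := subtitles.foldl
    (fun n x =>
      n.modify (getVal "filename" x) PySem.Dict.empty (fun byLang =>
        byLang.modify (getVal "lang" x) PySem.Dict.empty (fun byPlug =>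
          byPlug.modify (getVal "plugin" x) [] (fun leaf => leaf ++ [x]))))
    PySem.Dict.empty
  (PySem.List.sorted nested.keys (fun v => v)).map
    (fun f => (f, bLevel2 (nested.getD f PySem.Dict.empty)))

-- ===== PRECONDITION & SPEC =====
-- Pre_ excludes exactly the inputs where A raises: a dict missing one of the three keys
-- (KeyError), and two subtitles with the same filename/lang/plugin triple (the leaf
-- sorted() then compares two dicts: TypeError).  B raises on the same inputs.
def Pre_arrangeSubtitles (subtitles : List (List (String × String))) : Prop :=
  (∀ x ∈ subtitles,
    ((PySem.Dict.mk x).get? "filename").isSome ∧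
    ((PySem.Dict.mk x).get? "lang").isSome ∧
    ((PySem.Dict.mk x).get? "plugin").isSome) ∧
  subtitles.Pairwise (fun a b =>
    ¬(getVal "filename" a = getVal "filename" b ∧ getVal "lang" a = getVal "lang" b ∧
      getVal "plugin" a = getVal "plugin" b))
instance (subtitles : List (List (String × String))) : Decidable (Pre_arrangeSubtitles subtitles) := by unfold Pre_arrangeSubtitles; infer_instance

def pvWitness_arrangeSubtitles : (List (List (String × String))) :=
  [[("filename", "movie.avi"), ("lang", "en"), ("plugin", "OpenSubtitles")],
   [("filename", "movie.avi"), ("lang", "fr"), ("plugin", "OpenSubtitles")]]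

def Spec_arrangeSubtitles (subtitles : List (List (String × String))) (out : List (String × List (String × List (String × List (List (String × String)))))) : Prop := out = arrangeSubtitles_alt subtitles
instance (subtitles : List (List (String × String))) (out : List (String × List (String × List (String × List (List (String × String)))))) : Decidable (Spec_arrangeSubtitles subtitles out) := by
  unfold Spec_arrangeSubtitles
  letI d2 : DecidableEq (List (String × List (List (String × String)))) := inferInstance
  letI d3 : DecidableEq (List (String × List (String × List (List (String × String))))) := inferInstance
  letI d4 : DecidableEq (List (String × List (String × List (String × List (List (String × String)))))) := inferInstance
  exact d4 out (arrangeSubtitles_alt subtitles)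

-- ===== CLAIM (what is proved, stated in full; the proofs are below) =====
def Claim_equal_arrangeSubtitles : Prop := ∀ (subtitles : List (List (String × String))), Dom_arrangeSubtitles subtitles → Pre_arrangeSubtitles subtitles → Spec_arrangeSubtitles subtitles (arrangeSubtitles subtitles)

-- ===== LEMMAS AND PROOFS =====

-- the canonical three-level shape both ports reduce to: keys sorted after dedup, each key
-- paired with (a function of) the input filtered to that key, in input order
def canon {ν : Type} (k : List (String × String) → String)
    (xs : List (List (String × String))) (f : List (List (String × String)) → ν) :
    List (String × ν) :=
  (PySem.List.sorted (PySem.Set.ofList (xs.map k)) (fun v => v)).map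
    (fun v => (v, f (xs.filter (fun y => k y == v))))

lemma groupby_nil_iff (k : List (String × String) → String)
    (l : List (List (String × String))) : groupby k l = [] ↔ l = [] := by
  cases l with
  | nil => simp [groupby]
  | cons x xs =>
    simp only [groupby]
    cases h2 : groupby k xs with
    | nil => simp
    | cons q rest =>
      obtain ⟨v, g⟩ := q
      by_cases hv : k x == v <;> simp [hv]

-- groupby on a key-sorted list: chunk keys are strictly increasing, exhaust the keys, and
-- each chunk is the filter of the list to its key
lemma groupby_spec (k : List (String × String) → String)
    (l : List (List (String × String))) (h : l.Pairwise (fun a b => k a ≤ k b)) :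
    ((groupby k l).map Prod.fst).Pairwise (· < ·) ∧
    (∀ u, u ∈ (groupby k l).map Prod.fst ↔ u ∈ l.map k) ∧
    (∀ p ∈ groupby k l, p.2 = l.filter (fun y => k y == p.1)) := by
  induction l with
  | nil => simp [groupby]
  | cons x t ih =>
    have hx : ∀ y ∈ t, k x ≤ k y := fun y hy => (List.pairwise_cons.mp h).1 y hy
    obtain ⟨P, M, C⟩ := ih (List.pairwise_cons.mp h).2
    cases hg : groupby k t with
    | nil =>
      have htnil : t = [] := (groupby_nil_iff k t).mp hg
      subst htnil
      refine ⟨by simp [groupby], by simp [groupby], ?_⟩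
      intro p hp
      simp [groupby] at hp
      subst hp
      simp
    | cons q rest =>
      obtain ⟨v, g⟩ := q
      rw [hg] at P M C
      simp only [List.map_cons] at P
      have hvmem : v ∈ t.map k := (M v).mp (by simp)
      obtain ⟨y0, hy0, hky0⟩ := List.mem_map.mp hvmem
      have hxv : k x ≤ v := hky0 ▸ hx y0 hy0
      have hrest : ∀ u ∈ rest.map Prod.fst, v < u :=
        fun u hu => (List.pairwise_cons.mp P).1 u hu
      by_cases hv : k x = v
      · -- x joins the first chunk
        simp only [groupby, hg, hv, BEq.rfl, if_true]
        refine ⟨by simpa using P, ?_, ?_⟩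
        · intro u
          simp only [List.map_cons, List.mem_cons]
          constructor
          · intro hu
            rcases hu with h1 | h2
            · exact Or.inr (h1 ▸ hvmem)
            · exact Or.inr ((M u).mp (by simp [h2]))
          · intro hu
            rcases hu with h1 | h2
            · exact Or.inl (by rw [h1, hv])
            · simpa using (M u).mpr h2
        · intro p hp
          rcases List.mem_cons.mp hp with hp1 | hp2
          · subst hp1
            have hgfil : g = t.filter (fun y => k y == v) := by
              simpa using C (v, g) (by simp)
            simp [hv, hgfil]
          · have hne : k x ≠ p.1 := by
              have : v < p.1 := hrest p.1 (List.mem_map.mpr ⟨p, hp2, rfl⟩)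
              exact fun hc => absurd (hv ▸ hc ▸ this) (lt_irrefl _)
            have := C p (by simp [hp2])
            simp [hne, this]
      · -- x opens a fresh chunk
        have hxv' : k x < v := lt_of_le_of_ne hxv hv
        have hbeq : (k x == v) = false := by simpa using hv
        simp only [groupby, hg, hbeq, Bool.false_eq_true, if_false]
        refine ⟨?_, ?_, ?_⟩
        · simp only [List.map_cons]
          refine List.Pairwise.cons ?_ P
          intro u hu
          rcases List.mem_cons.mp hu with h1 | h2
          · exact h1 ▸ hxv'
          · exact lt_trans hxv' (hrest u h2)
        · intro u
          simp only [List.map_cons, List.mem_cons]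
          constructor
          · rintro (h1 | h2)
            · exact Or.inl h1
            · exact Or.inr ((M u).mp (by simpa using h2))
          · rintro (h1 | h2)
            · exact Or.inl h1
            · exact Or.inr (by simpa using (M u).mpr h2)
        · intro p hp
          rcases List.mem_cons.mp hp with hp1 | hp2
          · subst hp1
            have hfil : t.filter (fun y => k y == k x) = [] := by
              rw [List.filter_eq_nil_iff]
              intro y hy hc
              have hky : k y = k x := by simpa using hc
              have hmem : k x ∈ t.map k := List.mem_map.mpr ⟨y, hy, hky⟩
              rcases List.mem_cons.mp ((M (k x)).mpr hmem) with h1 | h2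
              · exact hv h1
              · exact absurd (hrest _ (by simpa using h2)) (not_lt_of_ge hxv)
            simp [hfil]
          · have hp1mem : p.1 ∈ v :: rest.map Prod.fst := by
              rcases List.mem_cons.mp hp2 with h1 | h2
              · exact List.mem_cons.mpr (Or.inl (by rw [h1]))
              · exact List.mem_cons.mpr (Or.inr (List.mem_map.mpr ⟨p, h2, rfl⟩))
            have hne : k x ≠ p.1 := by
              rcases List.mem_cons.mp hp1mem with h1 | h2
              · exact h1 ▸ hv
              · exact ne_of_lt (lt_trans hxv' (hrest _ h2))
            have := C p hp2
            simp [hne, this]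

-- stability of Python's sort: filtering one key class out of sorted(xs, key=k) gives the
-- class in original order
lemma filter_insertBy (k : List (String × String) → String) (x : List (String × String))
    (v : String) (l : List (List (String × String)))
    (h : l.Pairwise (fun a b => k a ≤ k b)) :
    (PySem.List.insertBy (fun a b => decide (k a < k b)) x l).filter (fun y => k y == v) =
      if k x == v then l.filter (fun y => k y == v) ++ [x]
      else l.filter (fun y => k y == v) := by
  induction l with
  | nil =>
    simp only [PySem.List.insertBy, List.filter_cons, List.filter_nil]
    by_cases hxv : k x = v <;> simp [hxv]
  | cons y ys ih =>
    have hy : ∀ z ∈ ys, k y ≤ k z := fun z hz => (List.pairwise_cons.mp h).1 z hz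
    simp only [PySem.List.insertBy]
    by_cases hlt : k x < k y
    · simp only [hlt, decide_true, if_true, List.filter_cons]
      by_cases hxv : k x = v
      · have hnil : ∀ z ∈ y :: ys, (k z == v) = false := by
          intro z hz
          have hyz : k y ≤ k z := by
            rcases List.mem_cons.mp hz with h1 | h2
            · exact le_of_eq (by rw [h1])
            · exact hy z h2
          have hvz : v < k z := lt_of_lt_of_le (hxv ▸ hlt) hyz
          simpa using ne_of_gt hvz
        have h1 : List.filter (fun z => k z == v) ys = [] :=
          List.filter_eq_nil_iff.mpr
            (fun z hz => by simp [hnil z (List.mem_cons_of_mem _ hz)])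
        simp [hxv, hnil y (by simp), h1]
      · simp [hxv]
    · simp only [hlt, decide_false, Bool.false_eq_true, if_false, List.filter_cons]
      rw [ih (List.pairwise_cons.mp h).2]
      by_cases hxv : k x = v <;> by_cases hyv : k y = v <;> simp [hxv, hyv]

lemma sorted_filter_key (k : List (String × String) → String)
    (xs : List (List (String × String))) (v : String) :
    (PySem.List.sorted xs k).filter (fun y => k y == v) = xs.filter (fun y => k y == v) := by
  induction xs using List.reverseRecOn with
  | nil => simp [PySem.List.sorted_eq_foldl_insertBy]
  | append_singleton xs x ih =>
    have hstep : PySem.List.sorted (xs ++ [x]) k =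
        PySem.List.insertBy (fun a b => decide (k a < k b)) x (PySem.List.sorted xs k) := by
      rw [PySem.List.sorted_eq_foldl_insertBy, PySem.List.sorted_eq_foldl_insertBy,
        List.foldl_append, List.foldl_cons, List.foldl_nil]
    rw [hstep, filter_insertBy k x v _ (PySem.List.sorted_pairwise xs k),
      List.filter_append, ih]
    by_cases hxv : k x = v <;> simp [hxv]

-- A's level shape equals canon
lemma aLevel_eq {ν : Type} (k : List (String × String) → String)
    (xs : List (List (String × String))) (f : List (List (String × String)) → ν) :
    ((groupby k (PySem.List.sorted xs k)).foldl
      (fun d pg => d.insert pg.1 (f pg.2)) PySem.Dict.empty).items = canon k xs f := by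
  obtain ⟨P, M, C⟩ := groupby_spec k _ (PySem.List.sorted_pairwise xs k)
  have hnodup : ((groupby k (PySem.List.sorted xs k)).map Prod.fst).Nodup :=
    P.imp ne_of_lt
  have hkeys : (groupby k (PySem.List.sorted xs k)).map Prod.fst =
      PySem.List.sorted (PySem.Set.ofList (xs.map k)) (fun v => v) := by
    symm
    apply PySem.List.sorted_eq_of_perm_of_pairwise_lt
    · rw [List.perm_ext_iff_of_nodup hnodup (PySem.Set.nodup_ofList _)]
      intro u
      rw [M u, PySem.Set.mem_ofList]
      exact ((PySem.List.sorted_perm xs k false).map k).mem_iff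
    · exact P
  rw [PySem.Dict.items_foldl_insert_fresh _ Prod.fst (fun pg => f pg.2) _
      (fun a _ => by simp) hnodup]
  unfold canon
  rw [← hkeys, List.map_map]
  apply List.map_congr_left
  intro p hp
  simp only [Function.comp]
  rw [C p hp, sorted_filter_key]

-- B's grouping fold, looked up at one key, is the fold over the filter
lemma getD_foldl_modify_filter {α ν : Type} (k : α → String) (d0 : ν) (g : α → ν → ν)
    (l : List α) (d : PySem.Dict String ν) (v : String) :
    (l.foldl (fun d x => d.modify (k x) d0 (g x)) d).getD v d0 =
      (l.filter (fun x => k x == v)).foldl (fun acc x => g x acc) (d.getD v d0) := by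
  induction l generalizing d with
  | nil => simp
  | cons x t ih =>
    simp only [List.foldl_cons, List.filter_cons]
    rw [ih]
    by_cases hx : k x = v
    · simp [hx]
    · simp [hx, PySem.Dict.getD_modify, Ne.symm hx]

-- B's level shape equals canon
lemma bLevel_eq {ν ρ : Type} (k : List (String × String) → String) (d0 : ν)
    (g : List (String × String) → ν → ν) (h : ν → ρ)
    (xs : List (List (String × String))) :
    (PySem.List.sorted (xs.foldl (fun d x => d.modify (k x) d0 (g x)) PySem.Dict.empty).keys
        (fun v => v)).map
      (fun v => (v, h ((xs.foldl (fun d x => d.modify (k x) d0 (g x))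
        PySem.Dict.empty).getD v d0))) =
    canon k xs (fun ys => h (ys.foldl (fun acc x => g x acc) d0)) := by
  have hk : (xs.foldl (fun d x => d.modify (k x) d0 (g x)) PySem.Dict.empty).keys =
      PySem.Set.ofList (xs.map k) := by
    rw [PySem.Dict.keys_foldl_modify_key xs k d0 (fun _ x => g x) PySem.Dict.empty]
    simp [PySem.Set.update_nil_left]
  unfold canon
  rw [hk]
  apply List.map_congr_left
  intro v _
  rw [getD_foldl_modify_filter, PySem.Dict.getD_empty]

-- the two inner levels agree
lemma lvl3_eq (ys : List (List (String × String))) :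
    aLevel3 ys = bLevel3 (ys.foldl
      (fun acc x => acc.modify (getVal "plugin" x) [] (fun leaf => leaf ++ [x]))
      PySem.Dict.empty) := by
  unfold aLevel3 bLevel3
  refine (aLevel_eq (getVal "plugin") ys (fun z => z)).trans ?_
  have hfun : (fun zs : List (List (String × String)) => zs) =
      (fun zs : List (List (String × String)) =>
        zs.foldl (fun acc x => acc ++ [x]) []) := by
    funext zs
    rw [PySem.List.foldl_append_singleton, List.nil_append]
  refine Eq.trans ?_
    (bLevel_eq (getVal "plugin") [] (fun x leaf => leaf ++ [x]) (fun z => z) ys).symm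
  unfold canon
  rw [← hfun]

lemma lvl2_eq (ys : List (List (String × String))) :
    aLevel2 ys = bLevel2 (ys.foldl
      (fun acc x => acc.modify (getVal "lang" x) PySem.Dict.empty (fun byPlug =>
        byPlug.modify (getVal "plugin" x) [] (fun leaf => leaf ++ [x])))
      PySem.Dict.empty) := by
  unfold aLevel2 bLevel2
  refine (aLevel_eq (getVal "lang") ys aLevel3).trans ?_
  have hfun : aLevel3 = (fun zs : List (List (String × String)) =>
      bLevel3 (zs.foldl
        (fun acc x => acc.modify (getVal "plugin" x) [] (fun leaf => leaf ++ [x]))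
        PySem.Dict.empty)) := funext lvl3_eq
  rw [hfun]
  exact (bLevel_eq (getVal "lang") PySem.Dict.empty _ bLevel3 ys).symm

-- ===== VERDICT (by name: the statement is the Claim_ definition above) =====
-- ===== VERDICT (by name: the statement is the Claim_ definition above) =====
theorem arrangeSubtitles_spec : Claim_equal_arrangeSubtitles := by
  intro subs _ _
  unfold Spec_arrangeSubtitles arrangeSubtitles arrangeSubtitles_alt
  refine (aLevel_eq (getVal "filename") subs aLevel2).trans ?_
  have hfun : aLevel2 = (fun zs : List (List (String × String)) =>
      bLevel2 (zs.foldl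
        (fun acc x => acc.modify (getVal "lang" x) PySem.Dict.empty (fun byPlug =>
          byPlug.modify (getVal "plugin" x) [] (fun leaf => leaf ++ [x])))
        PySem.Dict.empty)) := funext lvl2_eq
  rw [hfun]

  exact (bLevel_eq (getVal "filename") PySem.Dict.empty _ bLevel2 subs).symm
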